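-- pv_equiv track=rewrite | github.com/cdevogel25/AoC | 2022/day1.py | input_s2i
-- ===== SOURCE A (Python) =====
-- def input_s2i(s):
--     s2i_input = []
--     elf = []
--     for entry in s:
--         if entry == '':
--             s2i_input.append(elf)
--             elf = []
--         else:
--             elf.append(int(entry))
--
--     return s2i_input
-- ===== SOURCE B (Python) =====
-- def input_s2i(s):
--     nums = [None if e == '' else int(e) for e in s]
--     idx = [i for i, v in enumerate(nums) if v is None]
--     out = []
--     start = 0
--     for i in idx:
--         out.append(nums[start:i])
--         start = i + 1
--     return out
-- ===== Notes on version B (the rewrite author's own statement) =====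
-- stated objective: alternative
-- what changed: B first converts every entry (None for the '' delimiters, int otherwise), collects the delimiter indices, and then builds each group by slicing between consecutive delimiter indices, instead of A's single pass with a running group accumulator; the segment after the last delimiter is never emitted, matching A.
import Mathlib
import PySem

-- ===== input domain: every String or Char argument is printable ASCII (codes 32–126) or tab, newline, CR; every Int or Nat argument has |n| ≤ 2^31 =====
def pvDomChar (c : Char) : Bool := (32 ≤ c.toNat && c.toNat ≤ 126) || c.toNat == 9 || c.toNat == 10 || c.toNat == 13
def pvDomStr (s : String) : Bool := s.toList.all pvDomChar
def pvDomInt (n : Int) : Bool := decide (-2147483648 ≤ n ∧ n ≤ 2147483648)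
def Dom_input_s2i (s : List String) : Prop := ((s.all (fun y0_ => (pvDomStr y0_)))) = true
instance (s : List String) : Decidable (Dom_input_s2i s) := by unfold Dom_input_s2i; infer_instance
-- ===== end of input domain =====

-- B converts all entries first (None for '' delimiters), then slices each group out between consecutive delimiter indices: an alternative decomposition, not faster.


-- ===== PORT A =====
def input_s2i (s : List String) : List (List Int) :=
  (s.foldl (fun (st : List (List Int) × List Int) entry =>
      if entry == "" then (st.1 ++ [st.2], ([] : List Int))
      else (st.1, st.2 ++ [(PySem.Int.ofStr? entry).getD 0])) ([], [])).1

-- ===== PORT B =====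
def input_s2i_alt (s : List String) : List (List Int) :=
  let nums := s.map (fun e => if e == "" then (none : Option Int)
                              else some ((PySem.Int.ofStr? e).getD 0))
  let idx := ((PySem.List.enumerate nums 0).filter (fun p => p.2 == none)).map (·.1)
  (idx.foldl (fun (st : List (List Int) × Int) i =>
      -- nums[start:i] holds only ints in Python (no delimiter between start and i): extracting them is `map (·.getD 0)`
      (st.1 ++ [(PySem.List.slice nums (some st.2) (some i)).map (fun v => v.getD 0)],
       i + 1)) ([], 0)).1

-- ===== PRECONDITION & SPEC =====
-- Pre_ excludes exactly the inputs where A raises ValueError: some non-'' entry that int() rejects.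
def Pre_input_s2i (s : List String) : Prop :=
  (s.all (fun e => e == "" || (PySem.Int.ofStr? e).isSome)) = true
instance (s : List String) : Decidable (Pre_input_s2i s) := by unfold Pre_input_s2i; infer_instance
def pvWitness_input_s2i : List String := ["12", "", "+3", "-4", ""]

def Spec_input_s2i (s : List String) (out : List (List Int)) : Prop := out = input_s2i_alt s
instance (s : List String) (out : List (List Int)) : Decidable (Spec_input_s2i s out) := by unfold Spec_input_s2i; infer_instance

-- ===== CLAIM (what is proved, stated in full; the proofs are below) =====
def Claim_equal_input_s2i : Prop := ∀ (s : List String), Dom_input_s2i s → Pre_input_s2i s → Spec_input_s2i s (input_s2i s)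

-- ===== LEMMAS AND PROOFS =====

-- the common value of the two programs: grouping of the converted entries, with current group `elf`, trailing group dropped
def pvG : List (Option Int) → List Int → List (List Int)
  | [], _ => []
  | none :: t, elf => elf :: pvG t []
  | some v :: t, elf => pvG t (elf ++ [v])

def pvConv (e : String) : Option Int :=
  if e == "" then none else some ((PySem.Int.ofStr? e).getD 0)

theorem pvA_loop (s : List String) (acc : List (List Int)) (elf : List Int) :
    (s.foldl (fun (st : List (List Int) × List Int) entry =>
      if entry == "" then (st.1 ++ [st.2], ([] : List Int))
      else (st.1, st.2 ++ [(PySem.Int.ofStr? entry).getD 0])) (acc, elf)).1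
    = acc ++ pvG (s.map pvConv) elf := by
  induction s generalizing acc elf with
  | nil => simp [pvG]
  | cons e t ih =>
    rw [List.foldl_cons]
    by_cases h : e = ""
    · subst h
      simp only [beq_self_eq_true, if_true]
      rw [ih]
      simp [pvG, pvConv]
    · have hb : (e == "") = false := by simpa using h
      simp only [hb, Bool.false_eq_true, if_false]
      rw [ih]
      simp [pvG, pvConv, hb]

theorem pvB_loop (m q : List (Option Int)) (k start : Nat) (acc : List (List Int))
    (hle : start ≤ k) (hq : q.drop k = m) :
    ((((PySem.List.enumerate m (k : Int)).filter (fun p => p.2 == none)).map (·.1)).foldl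
      (fun (st : List (List Int) × Int) i =>
        (st.1 ++ [(PySem.List.slice q (some st.2) (some i)).map (fun v => v.getD 0)],
         i + 1)) (acc, (start : Int))).1
    = acc ++ pvG m (((q.drop start).take (k - start)).map (fun v => v.getD 0)) := by
  induction m generalizing k start acc with
  | nil => simp [PySem.List.enumerate, pvG]
  | cons e t ih =>
    have hdrop : q.drop (k + 1) = t := by
      rw [← List.drop_drop, hq]
      simp
    rw [PySem.List.enumerate_cons]
    match e with
    | none =>
      simp only [List.filter_cons, List.map_cons, beq_self_eq_true, if_true]
      rw [List.foldl_cons]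
      have hcast : (k : Int) + 1 = ((k + 1 : Nat) : Int) := by push_cast; ring
      rw [hcast, ih (k + 1) (k + 1) _ (le_refl _) hdrop]
      rw [PySem.List.slice_natCast]
      simp [pvG, List.append_assoc]
    | some v =>
      simp only [List.filter_cons]
      have hb : ((some v : Option Int) == none) = false := by simp
      rw [hb]
      simp only [if_false, Bool.false_eq_true]
      have hcast : (k : Int) + 1 = ((k + 1 : Nat) : Int) := by push_cast; ring
      rw [hcast, ih (k + 1) start acc (by omega) hdrop]
      have hk : q[k]? = some (some v) := by
        have h0 : (List.drop k q)[0]? = q[k + 0]? := by rw [List.getElem?_drop]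
        rw [hq] at h0
        simpa using h0.symm
      have hseg : (q.drop start).take (k + 1 - start)
          = (q.drop start).take (k - start) ++ [some v] := by
        have hget : (q.drop start)[k - start]? = some (some v) := by
          rw [List.getElem?_drop, show start + (k - start) = k by omega, hk]
        rw [show k + 1 - start = (k - start) + 1 by omega, List.take_add_one, hget]
        rfl
      rw [hseg]
      simp [pvG]

-- ===== VERDICT (by name: the statement is the Claim_ definition above) =====
theorem input_s2i_spec : Claim_equal_input_s2i := by
  intro s _ _
  unfold Spec_input_s2i input_s2i input_s2i_alt
  rw [pvA_loop]
  have hfun : (fun e => if e == "" then (none : Option Int)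
                        else some ((PySem.Int.ofStr? e).getD 0)) = pvConv := by
    funext e; simp [pvConv]
  rw [hfun]
  have h := pvB_loop (s.map pvConv) (s.map pvConv) 0 0 [] (le_refl _) (by simp)
  simpa using h.symm
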